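-- pv_equiv track=rewrite | github.com/guangtouwangba/weaver | backend/agents/orchestrator.py | _extract_themes
-- ===== SOURCE A (Python) =====
-- from typing import Dict, List, Any, Optional, Union
--
-- def _extract_themes(insights: List[str]) -> List[str]:
--     """Extract common themes from insights"""
--     # Simplified theme extraction
--     themes = {}
--     for insight in insights:
--         words = insight.lower().split()
--         for word in words:
--             if len(word) > 5:  # Filter short words
--                 themes[word] = themes.get(word, 0) + 1
--
--     # Return all themes
--     sorted_themes = sorted(themes.items(), key=lambda x: x[1], reverse=True)
--     return [theme for theme, count in sorted_themes]
-- ===== SOURCE B (Python) =====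
-- def _extract_themes(insights):
--     """Extract common themes from insights.
--
--     Alternative strategy: count the long words once, then emit words by
--     descending count LEVEL (from the maximum count down to 1) instead of
--     sorting -- ties naturally keep first-appearance order.
--     """
--     words = [w for s in insights for w in s.lower().split() if len(w) > 5]
--     counts = {}
--     for w in words:
--         counts[w] = counts.get(w, 0) + 1
--     result = []
--     for c in range(max(counts.values(), default=0), 0, -1):
--         result += [w for w, k in counts.items() if k == c]
--     return result
-- ===== Notes on version B (the rewrite author's own statement) =====
-- stated objective: alternative
-- what changed: B flattens the long words in one comprehension, counts them, and then emits words by descending count level (scanning the count dict once per count value from the maximum down to 1) instead of calling a comparison sort on the items.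
import Mathlib
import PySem

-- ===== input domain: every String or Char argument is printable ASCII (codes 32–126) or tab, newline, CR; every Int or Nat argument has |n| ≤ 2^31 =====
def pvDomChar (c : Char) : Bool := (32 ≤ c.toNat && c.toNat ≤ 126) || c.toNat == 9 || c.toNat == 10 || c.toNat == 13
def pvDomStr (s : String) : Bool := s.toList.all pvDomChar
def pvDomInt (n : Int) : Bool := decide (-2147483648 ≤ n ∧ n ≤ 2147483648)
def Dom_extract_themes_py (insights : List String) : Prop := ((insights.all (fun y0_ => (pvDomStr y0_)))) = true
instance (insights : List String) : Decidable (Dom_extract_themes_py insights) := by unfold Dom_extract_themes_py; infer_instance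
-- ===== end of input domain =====

-- B counts the long words once and emits them by descending count level instead of sorting; alternative decomposition, not claimed faster.

-- ===== PORT A =====
def extract_themes_py (insights : List String) : List String :=
  let themes : PySem.Dict String Int :=
    insights.foldl (fun themes insight =>
      (PySem.Str.split₀ (PySem.Str.lower insight)).foldl (fun themes word =>
        if 5 < PySem.Str.len word then themes.insert word (themes.getD word 0 + 1)
        else themes) themes) PySem.Dict.empty
  let sorted_themes := PySem.List.sorted themes.items (fun x => x.2) true
  sorted_themes.map (fun p => p.1)

-- ===== PORT B =====
def extract_themes_py_alt (insights : List String) : List String :=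
  let words := insights.flatMap (fun s =>
    (PySem.Str.split₀ (PySem.Str.lower s)).filter (fun w => decide (5 < PySem.Str.len w)))
  let counts : PySem.Dict String Int :=
    words.foldl (fun counts w => counts.insert w (counts.getD w 0 + 1)) PySem.Dict.empty
  (PySem.List.pyRange ((PySem.List.max? counts.values (fun v => v)).getD 0) 0 (-1)).foldl
    (fun result c => result ++ (counts.items.filter (fun p => p.2 == c)).map (fun p => p.1)) []

-- ===== PRECONDITION & SPEC =====
def Spec_extract_themes_py (insights : List String) (out : List String) : Prop := out = extract_themes_py_alt insights
instance (insights : List String) (out : List String) : Decidable (Spec_extract_themes_py insights out) := by unfold Spec_extract_themes_py; infer_instance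

-- ===== CLAIM (what is proved, stated in full; the proofs are below) =====
def Claim_equal_extract_themes_py : Prop := ∀ (insights : List String), Dom_extract_themes_py insights → Spec_extract_themes_py insights (extract_themes_py insights)

-- ===== LEMMAS AND PROOFS =====

-- bucket view: concatenation of the count-c items for c = M, M-1, …, 1
def pvBuckets {α : Type} (M : Int) (l : List (α × Int)) : List (α × Int) :=
  (PySem.List.pyRange M 0 (-1)).flatMap (fun c => l.filter (fun p => p.2 == c))

theorem pv_flatMap_congr {α β : Type} {l : List α} {f g : α → List β}
    (h : ∀ a ∈ l, f a = g a) : l.flatMap f = l.flatMap g := by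
  simp only [List.flatMap_def]
  rw [List.map_congr_left h]

theorem pvBuckets_nil {α : Type} (M : Int) : pvBuckets (α := α) M [] = ([] : List (α × Int)) := by
  simp [pvBuckets, List.flatMap_eq_nil_iff]

theorem pv_insertBy_cons_true {α : Type} (bef : α → α → Bool) (x y : α) (t : List α)
    (h : bef x y = true) : PySem.List.insertBy bef x (y :: t) = x :: y :: t := by
  simp [PySem.List.insertBy, h]

theorem pv_insertBy_front {α : Type} (bef : α → α → Bool) (x : α) (zs : List α)
    (h : ∀ y ∈ zs, bef x y = true) : PySem.List.insertBy bef x zs = x :: zs := by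
  cases zs with
  | nil => simp [PySem.List.insertBy]
  | cons y t => exact pv_insertBy_cons_true bef x y t (h y (by simp))

theorem pv_insertBy_pass {α : Type} (bef : α → α → Bool) (x : α) (ys zs : List α)
    (h : ∀ y ∈ ys, bef x y = false) :
    PySem.List.insertBy bef x (ys ++ zs) = ys ++ PySem.List.insertBy bef x zs := by
  induction ys with
  | nil => simp
  | cons y t ih =>
    have hy : bef x y = false := h y (by simp)
    simp only [List.cons_append, PySem.List.insertBy, hy]
    simp only [Bool.false_eq_true, if_false]
    rw [ih (fun z hz => h z (by simp [hz]))]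

-- inserting x (stably, reverse order by second component) into the bucket view appends x to its bucket
theorem pv_insert_buckets {α : Type} (n : Nat) (x : α × Int) (l : List (α × Int))
    (hx : 1 ≤ x.2) (hl : ∀ p ∈ l, 1 ≤ p.2) :
    PySem.List.insertBy (fun a b => decide (b.2 < a.2)) x (pvBuckets (x.2 + n) l)
      = pvBuckets (x.2 + n) (l ++ [x]) := by
  induction n generalizing l with
  | zero =>
    have h0 : (0 : Int) < x.2 + ((0 : Nat) : Int) := by omega
    simp only [pvBuckets, PySem.List.pyRange_neg_one_cons h0, List.flatMap_cons]
    rw [pv_insertBy_pass _ x _ _ ?hpass]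
    case hpass =>
      intro y hy
      simp only [List.mem_filter, beq_iff_eq] at hy
      simp [hy.2]
    rw [pv_insertBy_front _ x _ ?hfront]
    case hfront =>
      intro y hy
      simp only [List.mem_flatMap, List.mem_filter, beq_iff_eq] at hy
      obtain ⟨c, hc, _, hyc⟩ := hy
      rw [PySem.List.mem_pyRange_neg_one] at hc
      simp only [decide_eq_true_eq]
      omega
    have hcongr : (PySem.List.pyRange (x.2 + ((0 : Nat) : Int) - 1) 0 (-1)).flatMap
          (fun c => (l ++ [x]).filter (fun p => p.2 == c))
        = (PySem.List.pyRange (x.2 + ((0 : Nat) : Int) - 1) 0 (-1)).flatMap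
          (fun c => l.filter (fun p => p.2 == c)) := by
      apply pv_flatMap_congr
      intro c hc
      rw [PySem.List.mem_pyRange_neg_one] at hc
      rw [List.filter_append]
      have : ((x.2 == c) : Bool) = false := by simp; omega
      simp [this]
    rw [hcongr, List.filter_append]
    simp
  | succ n ih =>
    have h0 : (0 : Int) < x.2 + ((n + 1 : Nat) : Int) := by omega
    simp only [pvBuckets, PySem.List.pyRange_neg_one_cons h0, List.flatMap_cons]
    rw [pv_insertBy_pass _ x _ _ ?hpass2]
    case hpass2 =>
      intro y hy
      simp only [List.mem_filter, beq_iff_eq] at hy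
      simp only [decide_eq_false_iff_not, not_lt]
      omega
    have harith : x.2 + ((n + 1 : Nat) : Int) - 1 = x.2 + ((n : Nat) : Int) := by push_cast; ring
    have := ih l hl
    simp only [pvBuckets] at this
    rw [harith, this, List.filter_append]
    have hne : ((x.2 == x.2 + ((n + 1 : Nat) : Int)) : Bool) = false := by simp; omega
    simp only [hne, List.filter_cons, List.filter_nil, Bool.false_eq_true, if_false,
      List.append_nil]

-- the stable reverse sort by count IS the bucket view, for any M bounding the counts
theorem pv_sorted_eq_buckets {α : Type} (l : List (α × Int)) (M : Int)
    (h : ∀ p ∈ l, 1 ≤ p.2 ∧ p.2 ≤ M) :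
    PySem.List.sorted l (fun p => p.2) true = pvBuckets M l := by
  induction l using List.reverseRecOn with
  | nil =>
    rw [pvBuckets_nil]
    simp [PySem.List.sorted_eq_nil_iff]
  | append_singleton l x ih =>
    have hx := h x (by simp)
    have hl : ∀ p ∈ l, 1 ≤ p.2 ∧ p.2 ≤ M := fun p hp => h p (by simp [hp])
    rw [PySem.List.sorted_rev_eq_foldl_insertBy, List.foldl_append,
      ← PySem.List.sorted_rev_eq_foldl_insertBy]
    simp only [List.foldl_cons, List.foldl_nil]
    rw [ih hl]
    have hM : M = x.2 + ((M - x.2).toNat : Nat) := by omega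
    rw [hM]
    exact pv_insert_buckets _ x l hx.1 (fun p hp => (hl p hp).1)

theorem pv_foldl_foldl_flatMap {α β δ : Type} (l : List α) (g : α → List β)
    (f : δ → β → δ) (init : δ) :
    l.foldl (fun d a => (g a).foldl f d) init = (l.flatMap g).foldl f init := by
  induction l generalizing init with
  | nil => rfl
  | cons a t ih => simp only [List.foldl_cons, List.flatMap_cons, List.foldl_append, ih]

theorem pv_le_max_getD (l : List Int) (v : Int) (hv : v ∈ l) :
    v ≤ (PySem.List.max? l (fun x => x)).getD 0 := by
  cases h : PySem.List.max? l (fun x => x) with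
  | none =>
    rw [PySem.List.max?_eq_none_iff] at h
    subst h; simp at hv
  | some m =>
    simpa using PySem.List.max?_isMax h v hv

-- ===== VERDICT (by name: the statement is the Claim_ definition above) =====
theorem extract_themes_py_spec : Claim_equal_extract_themes_py := by
  intro insights _
  unfold Spec_extract_themes_py
  simp only [extract_themes_py, extract_themes_py_alt]
  -- both count dicts are counter(words) for the same word list
  have hA : (insights.foldl (fun themes insight =>
        (PySem.Str.split₀ (PySem.Str.lower insight)).foldl (fun themes word =>
          if 5 < PySem.Str.len word then themes.insert word (themes.getD word 0 + 1)
          else themes) themes) (PySem.Dict.empty : PySem.Dict String Int))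
      = PySem.Dict.counter (insights.flatMap (fun s =>
          (PySem.Str.split₀ (PySem.Str.lower s)).filter (fun w => decide (5 < PySem.Str.len w)))) := by
    have hinner : ∀ (d : PySem.Dict String Int) (ws : List String),
        ws.foldl (fun themes word =>
          if 5 < PySem.Str.len word then themes.insert word (themes.getD word 0 + 1)
          else themes) d
        = (ws.filter (fun w => decide (5 < PySem.Str.len w))).foldl
            (fun themes word => themes.insert word (themes.getD word 0 + 1)) d := by
      intro d ws
      exact PySem.List.foldl_ite_eq_foldl_filter _ _ _ _
    calc insights.foldl (fun themes insight =>
            (PySem.Str.split₀ (PySem.Str.lower insight)).foldl (fun themes word =>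
              if 5 < PySem.Str.len word then themes.insert word (themes.getD word 0 + 1)
              else themes) themes) (PySem.Dict.empty : PySem.Dict String Int)
        = insights.foldl (fun themes insight =>
            ((PySem.Str.split₀ (PySem.Str.lower insight)).filter
              (fun w => decide (5 < PySem.Str.len w))).foldl
              (fun themes word => themes.insert word (themes.getD word 0 + 1)) themes)
            PySem.Dict.empty := by
          exact PySem.List.foldl_congr_mem _ _ _ _ (fun d insight _ => hinner d (PySem.Str.split₀ (PySem.Str.lower insight)))
      _ = ((insights.flatMap (fun s => (PySem.Str.split₀ (PySem.Str.lower s)).filter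
              (fun w => decide (5 < PySem.Str.len w)))).foldl
              (fun themes word => themes.insert word (themes.getD word 0 + 1))
              PySem.Dict.empty) := by
          exact pv_foldl_foldl_flatMap _ _ _ _
      _ = _ := PySem.Dict.foldl_insert_getD_add_one_eq_counter _
  rw [hA, PySem.Dict.foldl_insert_getD_add_one_eq_counter]
  set words := insights.flatMap (fun s =>
    (PySem.Str.split₀ (PySem.Str.lower s)).filter (fun w => decide (5 < PySem.Str.len w))) with hw
  set d := PySem.Dict.counter words with hd
  set M := (PySem.List.max? d.values (fun v => v)).getD 0 with hM
  -- every count is in [1, M]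
  have hbounds : ∀ p ∈ d.items, 1 ≤ p.2 ∧ p.2 ≤ M := by
    intro p hp
    constructor
    · have := hp
      rw [hd, PySem.Dict.items_counter, List.mem_map] at this
      obtain ⟨k, hk, rfl⟩ := this
      have : k ∈ words := (PySem.Set.mem_ofList _ _).mp hk
      have hpos : 0 < words.count k := List.count_pos_iff.mpr this
      simp only []
      exact_mod_cast hpos
    · apply pv_le_max_getD
      simp only [PySem.Dict.values, List.mem_map]
      exact ⟨p, hp, rfl⟩
  rw [pv_sorted_eq_buckets d.items M hbounds]
  rw [PySem.List.foldl_append_eq_flatMap]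
  simp only [pvBuckets, List.nil_append, List.map_flatMap]
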